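-- pv_equiv track=rewrite | github.com/BRIGHTON-ASUMANI/data-structures_algorithms | codewars/password_maker.py | make_password
-- ===== SOURCE A (Python) =====
-- def make_password(phrase):
--     # Your code here
--     words = phrase.split(" ")
--     y = []
--     for x in words:
--         y.append(x[0])
--     d = "".join(y)
--     d = d.replace("o", "0")
--     d = d.replace("O", "0")
--     d = d.replace("i", "1")
--     d = d.replace("I", "1")
--     d = d.replace("s", "5")
--     d = d.replace("S", "5")
--     return d
-- ===== SOURCE B (Python) =====
-- _SUB = {"o": "0", "O": "0", "i": "1", "I": "1", "s": "5", "S": "5"}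
--
--
-- def make_password(phrase):
--     # One linear scan over the characters with a word-boundary flag:
--     # no split, no join of pieces, no repeated replace passes.
--     out = []
--     at_word_start = True
--     for c in phrase:
--         if c == " ":
--             at_word_start = True
--         elif at_word_start:
--             out.append(_SUB.get(c, c))
--             at_word_start = False
--     return "".join(out)
-- ===== Notes on version B (the rewrite author's own statement) =====
-- stated objective: alternative
-- what changed: B replaces A's split/collect/join followed by six sequential replace passes with a single character-by-character scan of the phrase using a word-boundary flag, emitting the substituted first letter of each word as it is met.
-- outside the precondition, e.g. on make_password(' '): A raises IndexError, B returns ''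
import Mathlib
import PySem

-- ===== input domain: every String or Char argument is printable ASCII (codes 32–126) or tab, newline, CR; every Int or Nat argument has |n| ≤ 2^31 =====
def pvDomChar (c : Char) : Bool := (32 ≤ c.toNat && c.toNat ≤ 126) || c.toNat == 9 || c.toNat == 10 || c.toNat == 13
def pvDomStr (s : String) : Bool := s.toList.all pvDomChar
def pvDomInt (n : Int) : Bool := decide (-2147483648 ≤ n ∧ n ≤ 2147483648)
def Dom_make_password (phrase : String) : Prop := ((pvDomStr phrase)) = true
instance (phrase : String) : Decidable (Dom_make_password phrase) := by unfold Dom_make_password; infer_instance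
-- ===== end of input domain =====

-- B replaces A's split/collect/join + six replace passes by a single character scan with a
-- word-boundary flag, substituting at emit time (alternative single-pass algorithm).


-- ===== PORT A =====
def make_password (phrase : String) : String :=
  let words := (PySem.Str.split? phrase " ").getD []   -- " " ≠ "", so split? is always some
  -- for x in words: y.append(x[0])   (x[0] raises on an empty token: excluded by Pre_)
  let y := words.foldl (fun acc x =>
      match PySem.Str.pyGet? x 0 with
      | some c => acc ++ [c]
      | none => acc) ([] : List Char)
  let d := String.ofList y                                  -- "".join(y)
  let d := PySem.Str.replace d "o" "0"
  let d := PySem.Str.replace d "O" "0"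
  let d := PySem.Str.replace d "i" "1"
  let d := PySem.Str.replace d "I" "1"
  let d := PySem.Str.replace d "s" "5"
  let d := PySem.Str.replace d "S" "5"
  d

-- ===== PORT B =====
-- _SUB = {"o":"0","O":"0","i":"1","I":"1","s":"5","S":"5"}
def pvSubDict : PySem.Dict Char Char :=
  ((((((PySem.Dict.empty).insert 'o' '0').insert 'O' '0').insert 'i' '1').insert
      'I' '1').insert 's' '5').insert 'S' '5'

-- _SUB.get(c, c)
def pvSub (c : Char) : Char := (pvSubDict.get? c).getD c

-- one scan over the characters with a word-boundary flag
def make_password_alt (phrase : String) : String :=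
  String.ofList
    (phrase.toList.foldl
      (fun (st : List Char × Bool) c =>
        if c = ' ' then (st.1, true)
        else if st.2 then (st.1 ++ [pvSub c], false)
        else (st.1, false))
      (([] : List Char), true)).1

-- ===== PRECONDITION & SPEC =====
-- Pre_ excludes phrases whose split(" ") contains an empty token (empty phrase, leading/
-- trailing or consecutive spaces): there Python A raises IndexError on x[0].
def Pre_make_password (phrase : String) : Prop :=
  ∀ w ∈ (PySem.Str.split? phrase " ").getD [], w ≠ ""
instance (phrase : String) : Decidable (Pre_make_password phrase) := by
  unfold Pre_make_password; infer_instance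
def pvWitness_make_password : String := "Is seven Owls"

def Spec_make_password (phrase : String) (out : String) : Prop := out = make_password_alt phrase
instance (phrase : String) (out : String) : Decidable (Spec_make_password phrase out) := by unfold Spec_make_password; infer_instance

-- ===== CLAIM =====
def Claim_equal_make_password : Prop := ∀ (phrase : String), Dom_make_password phrase → Pre_make_password phrase → Spec_make_password phrase (make_password phrase)

-- ===== LEMMAS AND PROOFS =====

-- proof-only model of split(" "): simple structural recursion on the characters
def pvSp (cur : List Char) : List Char → List (List Char)
  | [] => [cur]
  | c :: rest => if c = ' ' then cur :: pvSp [] rest else pvSp (cur ++ [c]) rest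

-- PySem's fuelled splitOn with the single-char separator [' '] is pvSp
theorem pv_go_sp (fuel : Nat) :
    ∀ (l cur : List Char) (acc : List (List Char)), l.length < fuel →
      PySem.Chars.splitOn.go [' '] fuel l cur acc = acc.reverse ++ pvSp cur.reverse l := by
  induction fuel with
  | zero => intro l cur acc h; omega
  | succ n ih =>
    intro l cur acc h
    cases l with
    | nil => simp [PySem.Chars.splitOn.go, pvSp]
    | cons c rest =>
      simp only [PySem.Chars.splitOn.go]
      have hpre : List.isPrefixOf [' '] (c :: rest) = (' ' == c) := by
        simp [List.isPrefixOf]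
      rw [hpre]
      by_cases hc : c = ' '
      · subst hc
        simp only [BEq.rfl, if_true, List.length_cons, List.drop_succ_cons, List.length_nil,
          List.drop_zero]
        rw [ih rest [] (cur.reverse :: acc) (by simpa using Nat.lt_of_succ_lt_succ h)]
        simp [pvSp]
      · have : (' ' == c) = false := by simp [Ne.symm hc]
        rw [this]
        simp only [Bool.false_eq_true, if_false]
        rw [ih rest (c :: cur) acc (by simpa using Nat.lt_of_succ_lt_succ h)]
        simp [pvSp, hc]

theorem pv_splitOn_sp (l : List Char) :
    PySem.Chars.splitOn l [' '] = pvSp [] l := by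
  unfold PySem.Chars.splitOn
  rw [pv_go_sp (l.length + 1) l [] [] (by omega)]
  simp

-- pvSp with a nonempty running chunk is pvSp [] with the chunk glued to the first token
theorem pv_sp_shift (rest : List Char) :
    ∃ t ts, pvSp [] rest = t :: ts ∧ ∀ cur, pvSp cur rest = (cur ++ t) :: ts := by
  induction rest with
  | nil => exact ⟨[], [], rfl, fun cur => by simp [pvSp]⟩
  | cons c r ih =>
    by_cases hc : c = ' '
    · subst hc
      exact ⟨[], pvSp [] r, by simp [pvSp], fun cur => by simp [pvSp]⟩
    · obtain ⟨t, ts, h0, hcur⟩ := ih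
      refine ⟨c :: t, ts, ?_, fun cur => ?_⟩
      · simp [pvSp, hc]; exact hcur [c]
      · simp [pvSp, hc]
        rw [hcur (cur ++ [c])]
        simp

-- the substituted first letters of the (nonempty) tokens
def pvF (ts : List (List Char)) : List Char := (ts.filterMap List.head?).map pvSub

-- B's scan computes pvF of the tokens
theorem pv_scan_sp (l : List Char) :
    ∀ (out : List Char) (b : Bool),
      (l.foldl (fun (st : List Char × Bool) c =>
          if c = ' ' then (st.1, true)
          else if st.2 then (st.1 ++ [pvSub c], false)
          else (st.1, false)) (out, b)).1
        = out ++ pvF (if b then pvSp [] l else (pvSp [] l).tail) := by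
  induction l with
  | nil => intro out b; cases b <;> simp [pvSp, pvF]
  | cons c rest ih =>
    intro out b
    by_cases hc : c = ' '
    · subst hc
      cases b <;> simp only [List.foldl_cons, if_true] <;>
        rw [ih out true] <;> simp [pvSp, pvF]
    · obtain ⟨t, ts, h0, hcur⟩ := pv_sp_shift rest
      cases b with
      | false =>
        simp only [List.foldl_cons, if_neg hc, Bool.false_eq_true, if_false]
        rw [ih out false]
        simp [pvSp, hc, hcur [c], h0]
      | true =>
        simp only [List.foldl_cons, if_neg hc, if_true]
        rw [ih (out ++ [pvSub c]) false]
        simp [pvSp, hc, hcur [c], h0, pvF]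

-- A's append loop collects exactly the defined first characters
theorem pv_foldl_firsts (ws : List String) (acc : List Char) :
    ws.foldl (fun acc x =>
      match PySem.Str.pyGet? x 0 with
      | some c => acc ++ [c]
      | none => acc) acc
      = acc ++ ws.filterMap (fun w => PySem.Str.pyGet? w 0) := by
  induction ws generalizing acc with
  | nil => simp
  | cons w ws ih =>
    cases h : PySem.Str.pyGet? w 0 <;>
      simp only [List.foldl_cons, List.filterMap_cons, h] <;> rw [ih] <;> simp

-- replacing a single character is a pointwise map
theorem pv_replace_go_single (a b : Char) :
    ∀ (fuel : Nat) (l acc : List Char), l.length ≤ fuel →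
      PySem.Chars.replace.go [a] [b] fuel l acc
        = acc.reverse ++ l.map (fun c => if c = a then b else c) := by
  intro fuel
  induction fuel with
  | zero =>
    intro l acc h
    have : l = [] := List.eq_nil_of_length_eq_zero (Nat.le_zero.mp h)
    subst this; simp [PySem.Chars.replace.go]
  | succ n ih =>
    intro l acc h
    cases l with
    | nil => simp [PySem.Chars.replace.go]
    | cons c t =>
      simp only [PySem.Chars.replace.go]
      have hlt : t.length ≤ n := by simpa using Nat.le_of_succ_le_succ h
      have hpre : List.isPrefixOf [a] (c :: t) = (a == c) := by
        simp [List.isPrefixOf]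
      by_cases hc : c = a
      · subst hc
        rw [hpre]
        simp only [BEq.rfl, if_true, List.length_cons, List.length_nil, Nat.zero_add,
          List.drop_succ_cons, List.drop_zero, List.reverse_cons, List.reverse_nil,
          List.nil_append, List.singleton_append]
        rw [ih t (b :: acc) hlt]
        simp
      · rw [hpre]
        have : (a == c) = false := by simp [Ne.symm hc]
        rw [this]
        simp only [Bool.false_eq_true, if_false]
        rw [ih t (c :: acc) hlt]
        simp [hc]

theorem pv_replace_single (cs : List Char) (a b : Char) :
    PySem.Chars.replace cs [a] [b] = cs.map (fun c => if c = a then b else c) := by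
  simp only [PySem.Chars.replace, List.isEmpty]
  exact pv_replace_go_single a b cs.length cs [] le_rfl

-- composing A's six single-character substitutions equals B's dict lookup
theorem pv_point (c : Char) :
    ((fun c => if c = 'S' then '5' else c) ∘ (fun c => if c = 's' then '5' else c) ∘
     (fun c => if c = 'I' then '1' else c) ∘ (fun c => if c = 'i' then '1' else c) ∘
     (fun c => if c = 'O' then '0' else c) ∘ (fun c => if c = 'o' then '0' else c)) c
      = pvSub c := by
  by_cases h1 : c = 'o'; · subst h1; decide
  by_cases h2 : c = 'O'; · subst h2; decide
  by_cases h3 : c = 'i'; · subst h3; decide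
  by_cases h4 : c = 'I'; · subst h4; decide
  by_cases h5 : c = 's'; · subst h5; decide
  by_cases h6 : c = 'S'; · subst h6; decide
  have b1 : ('o' == c) = false := by simp [Ne.symm h1]
  have b2 : ('O' == c) = false := by simp [Ne.symm h2]
  have b3 : ('i' == c) = false := by simp [Ne.symm h3]
  have b4 : ('I' == c) = false := by simp [Ne.symm h4]
  have b5 : ('s' == c) = false := by simp [Ne.symm h5]
  have b6 : ('S' == c) = false := by simp [Ne.symm h6]
  simp [pvSub, pvSubDict, PySem.Dict.get?, PySem.Dict.insert, PySem.Dict.empty, List.find?,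
    b1, b2, b3, b4, b5, b6, h1, h2, h3, h4, h5, h6, Function.comp]

-- the whole equivalence, as one lemma on the unfolded ports
set_option maxHeartbeats 1000000 in
theorem pv_main (phrase : String) :
    make_password phrase = make_password_alt phrase := by
  unfold make_password make_password_alt
  dsimp only
  rw [pv_foldl_firsts]
  simp only [List.nil_append]
  rw [pv_scan_sp phrase.toList [] true]
  simp only [if_true, List.nil_append]
  -- identify the token lists on both sides
  have hsplit : (PySem.Str.split? phrase " ").getD []
      = (pvSp [] phrase.toList).map String.ofList := by
    simp [PySem.Str.split?, PySem.Chars.split?, pv_splitOn_sp]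
  rw [hsplit]
  have hfirsts : ((pvSp [] phrase.toList).map String.ofList).filterMap
      (fun w => PySem.Str.pyGet? w 0)
      = (pvSp [] phrase.toList).filterMap List.head? := by
    rw [List.filterMap_map]
    apply List.filterMap_congr
    intro t _
    simp [PySem.Str.pyGet?, PySem.List.pyGet?_zero, List.head?_eq_getElem?]
  rw [hfirsts]
  set hs := (pvSp [] phrase.toList).filterMap List.head? with hhs
  have hmk : ∀ (s : List Char) (o n : Char),
      PySem.Str.replace (String.ofList s) (String.ofList [o]) (String.ofList [n])
        = String.ofList (s.map (fun c => if c = o then n else c)) := by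
    intro s o n
    simp [PySem.Str.replace, pv_replace_single]
  rw [show ("o" : String) = String.ofList ['o'] from rfl,
      show ("O" : String) = String.ofList ['O'] from rfl,
      show ("i" : String) = String.ofList ['i'] from rfl,
      show ("I" : String) = String.ofList ['I'] from rfl,
      show ("s" : String) = String.ofList ['s'] from rfl,
      show ("S" : String) = String.ofList ['S'] from rfl,
      show ("0" : String) = String.ofList ['0'] from rfl,
      show ("1" : String) = String.ofList ['1'] from rfl,
      show ("5" : String) = String.ofList ['5'] from rfl]
  rw [hmk, hmk, hmk, hmk, hmk, hmk]
  simp only [List.map_map]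
  unfold pvF
  exact congrArg String.ofList (List.map_congr_left (fun c _ => pv_point c))

-- ===== VERDICT =====
theorem make_password_spec : Claim_equal_make_password := by
  intro phrase hdom hpre
  unfold Spec_make_password
  exact pv_main phrase
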